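-- pv_equiv track=rewrite | github.com/overmind-core/overmind | overmind_core/overmind/template_extractor/helpers.py | find_anchor_positions
-- ===== SOURCE A (Python) =====
-- from typing import Dict, FrozenSet, List, Optional, Set, Tuple
--
-- def find_anchor_positions(tokens: List[str], anchors: List[str]) -> List[int]:
--     """
--     Find positions of anchor tokens within a token sequence.
--
--     Anchors must appear in order. Returns position indices.
--
--     Args:
--         tokens: The full token sequence (may include whitespace)
--         anchors: The anchor tokens to find (in order, no whitespace)
--
--     Returns:
--         List of position indices for each anchor
--     """
--     positions = []
--     search_start = 0
--
--     for anchor in anchors: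
--         for i in range(search_start, len(tokens)):
--             if tokens[i] == anchor:
--                 positions.append(i)
--                 search_start = i + 1
--                 break
--
--     return positions
-- ===== SOURCE B (Python) =====
-- from typing import Dict, List
--
--
-- def _bisect_left(a: List[int], x: int) -> int:
--     # textbook bisect_left (bisect module not imported by the original file)
--     lo, hi = 0, len(a)
--     while lo < hi:
--         mid = (lo + hi) // 2
--         if a[mid] < x:
--             lo = mid + 1
--         else:
--             hi = mid
--     return lo
--
--
-- def find_anchor_positions(tokens: List[str], anchors: List[str]) -> List[int]:
--     # Index every token's occurrence positions once, then binary-search each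
--     # anchor's (sorted) position list for the first occurrence >= search_start.
--     index: Dict[str, List[int]] = {}
--     for i, tok in enumerate(tokens):
--         index.setdefault(tok, []).append(i)
--
--     positions = []
--     search_start = 0
--     for anchor in anchors:
--         ps = index.get(anchor, [])
--         j = _bisect_left(ps, search_start)
--         if j < len(ps):
--             positions.append(ps[j])
--             search_start = ps[j] + 1
--     return positions
-- ===== Notes on version B (the rewrite author's own statement) =====
-- stated objective: faster
-- what changed: Replaced the per-anchor linear rescan of tokens by a one-pass token->sorted-positions index plus a binary search (bisect_left) for the first occurrence >= search_start per anchor.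
import Mathlib
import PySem

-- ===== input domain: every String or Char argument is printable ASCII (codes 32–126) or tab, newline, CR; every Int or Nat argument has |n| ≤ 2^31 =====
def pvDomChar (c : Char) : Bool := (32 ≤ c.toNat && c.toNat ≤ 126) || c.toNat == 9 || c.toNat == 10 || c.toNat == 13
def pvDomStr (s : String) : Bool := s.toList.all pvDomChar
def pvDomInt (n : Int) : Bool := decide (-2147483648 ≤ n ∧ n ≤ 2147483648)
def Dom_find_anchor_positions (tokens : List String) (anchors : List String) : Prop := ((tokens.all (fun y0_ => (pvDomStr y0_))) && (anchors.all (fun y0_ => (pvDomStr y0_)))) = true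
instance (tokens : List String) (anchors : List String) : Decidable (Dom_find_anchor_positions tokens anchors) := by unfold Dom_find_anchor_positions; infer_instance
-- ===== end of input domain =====

-- B builds a token -> positions index once and binary-searches it per anchor instead of A's
-- per-anchor linear rescan of the whole token list (objective: faster, O(n+m log n) vs O(n*m)).

-- ===== PORT A =====
-- inner 'for i in range(search_start, len(tokens)): if tokens[i] == anchor: … break'
-- (pyGetD with default "" is exact here: every i produced by pyRange s n with 0 ≤ s is in range)
def aScan (tokens : List String) (anchor : String) : List Int → Option Int
  | [] => none
  | i :: rest =>
      if PySem.List.pyGetD tokens i "" == anchor then some i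
      else aScan tokens anchor rest

def find_anchor_positions (tokens : List String) (anchors : List String) : List Int :=
  (anchors.foldl (fun (st : List Int × Int) anchor =>
      match aScan tokens anchor (PySem.List.pyRange st.2 (tokens.length : Int)) with
      | some i => (st.1 ++ [i], i + 1)
      | none => st) ([], 0)).1

-- ===== PORT B =====
-- 'for i, tok in enumerate(tokens): index.setdefault(tok, []).append(i)', keyed by the token
def bIndex (tokens : List String) : PySem.Dict String (List Int) :=
  ((PySem.List.enumerate tokens).map (fun p => (p.2, p.1))).foldl
    (fun d p => d.modify p.1 [] (fun l => l ++ [p.2])) PySem.Dict.empty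

-- _bisect_left in Source B is the textbook lo/hi binary-search loop = PySem.List.bisectLeft
def find_anchor_positions_alt (tokens : List String) (anchors : List String) : List Int :=
  let index := bIndex tokens
  (anchors.foldl (fun (st : List Int × Int) anchor =>
      let ps := index.getD anchor []
      let j := PySem.List.bisectLeft ps st.2
      if h : j < ps.length then (st.1 ++ [ps[j]], ps[j] + 1) else st) ([], 0)).1

-- ===== PRECONDITION & SPEC =====
def Spec_find_anchor_positions (tokens : List String) (anchors : List String) (out : List Int) : Prop := out = find_anchor_positions_alt tokens anchors
instance (tokens : List String) (anchors : List String) (out : List Int) : Decidable (Spec_find_anchor_positions tokens anchors out) := by unfold Spec_find_anchor_positions; infer_instance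

-- ===== CLAIM (what is proved, stated in full; the proofs are below) =====
def Claim_equal_find_anchor_positions : Prop := ∀ (tokens : List String) (anchors : List String), Dom_find_anchor_positions tokens anchors → Spec_find_anchor_positions tokens anchors (find_anchor_positions tokens anchors)

-- ===== LEMMAS AND PROOFS =====

-- occurrence positions of `anchor` in `tokens`, in increasing order
def occ (tokens : List String) (anchor : String) : List Int :=
  ((PySem.List.enumerate tokens).filter (fun p => p.2 == anchor)).map (fun p => p.1)

-- first element ≥ s of a list (reference scan both ports are reduced to)
def firstGE : List Int → Int → Option Int
  | [], _ => none
  | x :: xs, s => if s ≤ x then some x else firstGE xs s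

theorem bIndex_getD (tokens : List String) (anchor : String) :
    (bIndex tokens).getD anchor [] = occ tokens anchor := by
  unfold bIndex occ
  rw [PySem.Dict.getD_foldl_modify_append]
  simp [List.filter_map, List.map_map, Function.comp_def]

theorem mem_occ_iff (tokens : List String) (anchor : String) (x : Int) :
    x ∈ occ tokens anchor ↔
      ∃ (k : Nat) (_ : k < tokens.length), x = (k : Int) ∧ tokens[k] = anchor := by
  unfold occ
  simp only [List.mem_map, List.mem_filter, PySem.List.mem_enumerate_iff]
  constructor
  · rintro ⟨p, ⟨⟨k, hk, rfl⟩, hb⟩, rfl⟩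
    exact ⟨k, hk, by simp, by simpa using hb⟩
  · rintro ⟨k, hk, rfl, hv⟩
    exact ⟨((k : Int), tokens[k]), ⟨⟨k, hk, by simp⟩, by simpa using hv⟩, by simp⟩

theorem occ_pairwise (tokens : List String) (anchor : String) :
    (occ tokens anchor).Pairwise (· < ·) := by
  unfold occ
  exact (List.Pairwise.map _ (fun a b h => h)
    ((PySem.List.pairwise_lt_enumerate tokens 0).filter _))

theorem firstGE_eq_none (xs : List Int) (s : Int) (h : ∀ x ∈ xs, x < s) :
    firstGE xs s = none := by
  induction xs with
  | nil => rfl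
  | cons x xs ih =>
      have hx := h x (by simp)
      simp only [firstGE]
      rw [if_neg (show ¬ s ≤ x by omega)]
      exact ih (fun y hy => h y (by simp [hy]))

theorem firstGE_of_mem (xs : List Int) (s : Int)
    (hp : xs.Pairwise (· < ·)) (hs : s ∈ xs) : firstGE xs s = some s := by
  induction xs with
  | nil => simp at hs
  | cons x xs ih =>
      rcases List.mem_cons.1 hs with rfl | hs'
      · simp [firstGE]
      · have hx : x < s := (List.pairwise_cons.1 hp).1 s hs'
        simp only [firstGE]
        rw [if_neg (show ¬ s ≤ x by omega)]
        exact ih (List.pairwise_cons.1 hp).2 hs'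

theorem firstGE_succ_of_not_mem (xs : List Int) (s : Int) (hs : s ∉ xs) :
    firstGE xs s = firstGE xs (s + 1) := by
  induction xs with
  | nil => rfl
  | cons x xs ih =>
      have hxs : x ≠ s := fun h => hs (by simp [h])
      by_cases h : s ≤ x
      · have : s + 1 ≤ x := by omega
        simp [firstGE, h, this]
      · simp only [firstGE, if_neg h, if_neg (by omega : ¬ s + 1 ≤ x)]
        exact ih (fun h' => hs (by simp [h']))

theorem firstGE_getElem? (xs : List Int) (s : Int) (j : Nat)
    (hj : j ≤ xs.length)
    (hlt : ∀ k (hk : k < xs.length), k < j → xs[k] < s)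
    (hge : ∀ k (hk : k < xs.length), j ≤ k → s ≤ xs[k]) :
    firstGE xs s = xs[j]? := by
  induction xs generalizing j with
  | nil => simp [firstGE]
  | cons x xs ih =>
      cases j with
      | zero =>
          have hx := hge 0 (by simp) (by omega)
          simp only [firstGE]
          rw [if_pos (show s ≤ x by simpa using hx)]
          simp
      | succ j' =>
          have hx : x < s := by simpa using hlt 0 (by simp) (by omega)
          simp only [firstGE]
          rw [if_neg (show ¬ s ≤ x by omega)]
          have := ih j' (by simpa using hj)
            (fun k hk hkj => by simpa using hlt (k+1) (by simpa using hk) (by omega))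
            (fun k hk hkj => by simpa using hge (k+1) (by simpa using hk) (by omega))
          simpa using this

-- A's inner loop computes firstGE (occ tokens anchor) s, for 0 ≤ s
theorem aScan_eq_firstGE (tokens : List String) (anchor : String) (s : Int) (hs : 0 ≤ s) :
    aScan tokens anchor (PySem.List.pyRange s (tokens.length : Int))
      = firstGE (occ tokens anchor) s := by
  by_cases hlt : s < (tokens.length : Int)
  · have hrange := PySem.List.pyRange_one_cons hlt
    rw [hrange]
    have hidx : PySem.List.pyGetD tokens s "" = tokens[s.toNat]'(by omega) :=
      PySem.List.pyGetD_eq_getElem tokens "" hs hlt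
    by_cases hm : tokens[s.toNat]'(by omega) = anchor
    · have hmem : s ∈ occ tokens anchor :=
        (mem_occ_iff tokens anchor s).2 ⟨s.toNat, by omega, by omega, hm⟩
      simp only [aScan, hidx, hm, beq_self_eq_true, if_true]
      exact (firstGE_of_mem _ _ (occ_pairwise tokens anchor) hmem).symm
    · have hnm : s ∉ occ tokens anchor := by
        intro hmem
        rcases (mem_occ_iff tokens anchor s).1 hmem with ⟨k, hk, hks, hkv⟩
        exact hm (by
          have : k = s.toNat := by omega
          simpa [this] using hkv)
      simp only [aScan, hidx]
      rw [if_neg (by simpa using hm)]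
      rw [aScan_eq_firstGE tokens anchor (s + 1) (by omega)]
      exact (firstGE_succ_of_not_mem _ _ hnm).symm
  · have hrange : PySem.List.pyRange s (tokens.length : Int) = [] := by
      simp [PySem.List.pyRange]; omega
    rw [hrange]
    have : ∀ x ∈ occ tokens anchor, x < s := by
      intro x hx
      rcases (mem_occ_iff tokens anchor x).1 hx with ⟨k, hk, rfl, _⟩
      omega
    rw [firstGE_eq_none _ _ this]
    rfl
termination_by ((tokens.length : Int) - s).toNat
decreasing_by omega

theorem occ_nonneg (tokens : List String) (anchor : String) (x : Int)
    (hx : x ∈ occ tokens anchor) : 0 ≤ x := by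
  rcases (mem_occ_iff tokens anchor x).1 hx with ⟨k, _, rfl, _⟩; omega

-- B's per-anchor step (lookup + bisect) also computes firstGE
theorem firstGE_mem (xs : List Int) (s i : Int) (h : firstGE xs s = some i) : i ∈ xs := by
  induction xs with
  | nil => simp [firstGE] at h
  | cons x xs ih =>
      by_cases hx : s ≤ x
      · simp only [firstGE] at h
        rw [if_pos hx] at h
        simp_all
      · simp only [firstGE] at h
        rw [if_neg hx] at h
        exact List.mem_cons_of_mem _ (ih h)

theorem step_eq (xs : List Int) (s : Int) (acc : List Int) (hp : xs.Pairwise (· < ·)) :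
    (if h : PySem.List.bisectLeft xs s < xs.length
       then (acc ++ [xs[PySem.List.bisectLeft xs s]], xs[PySem.List.bisectLeft xs s] + 1)
       else (acc, s))
    = match firstGE xs s with
      | some i => (acc ++ [i], i + 1)
      | none => (acc, s) := by
  have hple : xs.Pairwise (· ≤ ·) := hp.imp (fun h => le_of_lt h)
  obtain ⟨hle, hlt, hge⟩ := PySem.List.bisectLeft_spec xs s hple
  by_cases h : PySem.List.bisectLeft xs s < xs.length
  · have hfg : firstGE xs s = some (xs[PySem.List.bisectLeft xs s]'h) := by
      rw [firstGE_getElem? xs s _ hle (fun k hk hkj => hlt k hk hkj) hge]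
      simp [List.getElem?_eq_getElem h]
    rw [dif_pos h, hfg]
  · have hfg : firstGE xs s = none := by
      refine firstGE_eq_none xs s ?_
      intro x hx
      rcases List.mem_iff_getElem.1 hx with ⟨k, hk, rfl⟩
      exact hlt k hk (by omega)
    rw [dif_neg h, hfg]

-- the two folds agree, by induction on anchors with invariant 0 ≤ search_start
theorem fold_agree (tokens : List String) (anchors : List String)
    (acc : List Int) (s : Int) (hs : 0 ≤ s) :
    anchors.foldl (fun (st : List Int × Int) anchor =>
        match aScan tokens anchor (PySem.List.pyRange st.2 (tokens.length : Int)) with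
        | some i => (st.1 ++ [i], i + 1)
        | none => st) (acc, s)
    = anchors.foldl (fun (st : List Int × Int) anchor =>
        let ps := (bIndex tokens).getD anchor []
        let j := PySem.List.bisectLeft ps st.2
        if h : j < ps.length then (st.1 ++ [ps[j]], ps[j] + 1) else st) (acc, s) := by
  induction anchors generalizing acc s with
  | nil => rfl
  | cons anchor rest ih =>
      simp only [List.foldl_cons, bIndex_getD]
      rw [aScan_eq_firstGE tokens anchor s hs,
        step_eq (occ tokens anchor) s acc (occ_pairwise tokens anchor)]
      cases hfg : firstGE (occ tokens anchor) s with
      | none =>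
          simp only
          have := ih acc s hs
          simp only [bIndex_getD] at this
          exact this
      | some i =>
          simp only
          have hi : 0 ≤ i := occ_nonneg tokens anchor i (firstGE_mem _ _ _ hfg)
          have := ih (acc ++ [i]) (i + 1) (by omega)
          simp only [bIndex_getD] at this
          exact this

-- ===== VERDICT (by name: the statement is the Claim_ definition above) =====
theorem find_anchor_positions_spec : Claim_equal_find_anchor_positions := by
  intro tokens anchors _
  unfold Spec_find_anchor_positions find_anchor_positions find_anchor_positions_alt
  rw [fold_agree tokens anchors [] 0 le_rfl]
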